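-- pv_equiv track=rewrite | github.com/JulianStier/elman-srl | util/util.py | context_window
-- ===== SOURCE A (Python) =====
-- def context_window(l, win):
--     '''
--     win :: int corresponding to the size of the window
--     given a list of indexes composing a sentence
--
--     l :: array containing the word indexes
--
--     it will return a list of list of indexes corresponding
--     to context windows surrounding each word in the sentence
--     '''
--     assert (win % 2) == 1
--     assert win >= 1
--     l = list(l)
--
--     lpadded = win // 2 * [-1] + l + win // 2 * [-1]
--     out = [lpadded[i:(i + win)] for i in range(len(l))]
--
--     assert len(out) == len(l)
--     return out
-- ===== SOURCE B (Python) =====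
-- def context_window(l, win):
--     '''
--     win :: int corresponding to the size of the window
--     given a list of indexes composing a sentence
--
--     l :: array containing the word indexes
--
--     it will return a list of list of indexes corresponding
--     to context windows surrounding each word in the sentence
--     '''
--     assert (win % 2) == 1
--     assert win >= 1
--     l = list(l)
--
--     half = win // 2
--     return [[l[i + off] if 0 <= i + off < len(l) else -1
--              for off in range(-half, half + 1)]
--             for i in range(len(l))]
-- ===== Notes on version B (the rewrite author's own statement) =====
-- stated objective: alternative
-- what changed: B builds each window directly with bounds-checked index arithmetic over offsets -win//2..win//2 instead of constructing a padded copy of the list and slicing it; no intermediate padded array is maintained.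
import Mathlib
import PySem

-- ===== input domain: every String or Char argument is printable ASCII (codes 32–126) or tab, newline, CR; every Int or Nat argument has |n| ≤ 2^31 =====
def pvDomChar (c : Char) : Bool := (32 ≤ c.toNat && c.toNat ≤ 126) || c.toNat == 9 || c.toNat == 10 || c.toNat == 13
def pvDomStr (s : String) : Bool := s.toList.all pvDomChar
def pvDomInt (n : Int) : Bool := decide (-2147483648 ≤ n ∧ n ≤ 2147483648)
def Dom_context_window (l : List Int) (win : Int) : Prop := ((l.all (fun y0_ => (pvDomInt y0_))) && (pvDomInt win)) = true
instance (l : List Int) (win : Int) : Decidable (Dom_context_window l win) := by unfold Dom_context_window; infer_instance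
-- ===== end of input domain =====

-- B builds each window by bounds-checked index arithmetic over offsets instead of padding the list and slicing (objective: alternative).

-- ===== PORT A =====
-- pad with win//2 sentinels on each side, then slice a window at each position
def context_window (l : List Int) (win : Int) : List (List Int) :=
  let lpadded : List Int :=
    List.replicate (PySem.Int.floordiv win 2).toNat (-1) ++ l ++
    List.replicate (PySem.Int.floordiv win 2).toNat (-1)
  (PySem.List.pyRange 0 (l.length : Int) 1).map
    (fun i => PySem.List.slice lpadded (some i) (some (i + win)))

-- ===== PORT B =====
def context_window_alt (l : List Int) (win : Int) : List (List Int) :=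
  let half := PySem.Int.floordiv win 2
  (PySem.List.pyRange 0 (l.length : Int) 1).map
    (fun i => (PySem.List.pyRange (-half) (half + 1) 1).map
      (fun off => if 0 ≤ i + off ∧ i + off < (l.length : Int)
                  then l.getD (i + off).toNat (-1) else -1))

-- ===== PRECONDITION & SPEC =====
-- exactly A's two asserts: win odd and win ≥ 1 (otherwise A raises AssertionError)
def Pre_context_window (l : List Int) (win : Int) : Prop :=
  PySem.Int.mod win 2 = 1 ∧ 1 ≤ win
instance (l : List Int) (win : Int) : Decidable (Pre_context_window l win) := by
  unfold Pre_context_window; infer_instance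

def pvWitness_context_window : List Int × Int := ([4, 7, 9], 3)

def Spec_context_window (l : List Int) (win : Int) (out : List (List Int)) : Prop := out = context_window_alt l win
instance (l : List Int) (win : Int) (out : List (List Int)) : Decidable (Spec_context_window l win out) := by unfold Spec_context_window; infer_instance

-- ===== CLAIM (what is proved, stated in full; the proofs are below) =====
def Claim_equal_context_window : Prop := ∀ (l : List Int) (win : Int), Dom_context_window l win → Pre_context_window l win → Spec_context_window l win (context_window l win)

-- ===== LEMMAS AND PROOFS =====

-- the padded list indexed: sentinel outside the copy of l, l shifted by h inside
theorem pv_lpadded_getElem (l : List Int) (h k : Nat)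
    (hk : k < l.length + (h + h)) :
    (List.replicate h (-1 : Int) ++ l ++ List.replicate h (-1 : Int))[k]'(by simp; omega)
      = if hc : h ≤ k ∧ k < h + l.length then l[k - h]'(by omega) else -1 := by
  rcases Nat.lt_or_ge k h with hlt | hge
  · rw [List.getElem_append_left (by simp; omega)]
    rw [List.getElem_append_left (by simp; omega)]
    simp [List.getElem_replicate]
    omega
  · rcases Nat.lt_or_ge k (h + l.length) with hmid | hhi
    · rw [List.getElem_append_left (by simp; omega)]
      rw [List.getElem_append_right (by simp; omega)]
      simp [hge, hmid, List.length_replicate]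
    · rw [List.getElem_append_right (by simp; omega)]
      simp [List.getElem_replicate]
      omega

-- one row: A's slice of the padded list equals B's offset-built window
theorem pv_row_eq (l : List Int) (h i : Nat) (hi : i < l.length) :
    PySem.List.slice
      (List.replicate h (-1 : Int) ++ l ++ List.replicate h (-1 : Int))
      (some (i : Int)) (some ((i : Int) + ((2 * h + 1 : Nat) : Int)))
    = (PySem.List.pyRange (-(h : Int)) ((h : Int) + 1) 1).map
        (fun off => if 0 ≤ (i : Int) + off ∧ (i : Int) + off < (l.length : Int)
                    then l.getD ((i : Int) + off).toNat (-1) else -1) := by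
  rw [PySem.List.slice_natCast_add, PySem.List.pyRange_one]
  have hlen : ((h : Int) + 1 - -(h : Int)).toNat = 2 * h + 1 := by omega
  rw [hlen]
  apply List.ext_getElem
  · simp [List.length_replicate]; omega
  · intro k hk1 hk2
    have hk : k < 2 * h + 1 := by simpa using hk2
    simp only [List.getElem_take, List.getElem_drop, List.getElem_map, List.getElem_range]
    rw [pv_lpadded_getElem l h (i + k) (by omega)]
    have harith : (-(h : Int) + (k : Int)) = ((i : Int) + (-(h : Int) + (k : Int))) - i := by ring
    by_cases hc : h ≤ i + k ∧ i + k < h + l.length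
    · rw [dif_pos hc, if_pos (by constructor <;> [omega; omega])]
      have : ((i : Int) + (-(h : Int) + (k : Int))).toNat = i + k - h := by omega
      rw [this]
      exact (List.getD_eq_getElem l (-1) (by omega)).symm
    · rw [dif_neg hc, if_neg (by omega)]

-- ===== VERDICT (by name: the statement is the Claim_ definition above) =====
theorem context_window_spec : Claim_equal_context_window := by
  intro l win _ hpre
  obtain ⟨hodd, hge⟩ := hpre
  unfold Spec_context_window context_window context_window_alt
  simp only []
  have h0 : 0 ≤ PySem.Int.floordiv win 2 := by
    have h1 := PySem.Int.floordiv_mul_add_mod win 2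
    have h2 := PySem.Int.mod_lt win (b := 2) (by omega)
    omega
  obtain ⟨n, hn⟩ : ∃ n : Nat, PySem.Int.floordiv win 2 = (n : Int) :=
    ⟨(PySem.Int.floordiv win 2).toNat, by omega⟩
  have hwin : win = ((2 * n + 1 : Nat) : Int) := by
    have h1 := PySem.Int.floordiv_mul_add_mod win 2
    rw [hodd, hn] at h1; push_cast; omega
  rw [hn, hwin]
  simp only [Int.toNat_natCast]
  apply List.map_congr_left
  intro i hi
  rw [PySem.List.mem_pyRange_one] at hi
  obtain ⟨ni, hni⟩ : ∃ ni : Nat, i = (ni : Int) := ⟨i.toNat, by omega⟩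
  have hni' : ni < l.length := by omega
  rw [hni]
  exact pv_row_eq l n ni hni'
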